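-- pv_equiv track=rewrite | github.com/MdImranKhanSiam/Problem_Solving | Contest/ICPC 2025 Team Formation Contest - 1 (UGV)/B.py | check
-- ===== SOURCE A (Python) =====
-- def check(number):
--     for i in str(number):
--         if i == '0':
--             return False
--
--     first = True
--     previous = -1
--
--     for i in str(number):
--         if first == True:
--             first = False
--             previous = i
--         else:
--             if i == previous:
--                 return False
--
--             previous = i
--
--     return True
-- ===== SOURCE B (Python) =====
-- def check(number):
--     # Purely arithmetic: extract decimal digits of abs(number) with divmod,
--     # rejecting a zero digit or a repeat of the previous digit. No string is built.
--     n = abs(number)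
--     prev = -1
--     while True:
--         n, d = divmod(n, 10)
--         if d == 0 or d == prev:
--             return False
--         prev = d
--         if n == 0:
--             return True
-- ===== Notes on version B (the rewrite author's own statement) =====
-- stated objective: alternative
-- what changed: B never builds str(number): it extracts the decimal digits of abs(number) arithmetically with divmod in one while-loop, rejecting a zero digit or a digit equal to the previous one, instead of A's two separate character scans over the string.
import Mathlib
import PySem

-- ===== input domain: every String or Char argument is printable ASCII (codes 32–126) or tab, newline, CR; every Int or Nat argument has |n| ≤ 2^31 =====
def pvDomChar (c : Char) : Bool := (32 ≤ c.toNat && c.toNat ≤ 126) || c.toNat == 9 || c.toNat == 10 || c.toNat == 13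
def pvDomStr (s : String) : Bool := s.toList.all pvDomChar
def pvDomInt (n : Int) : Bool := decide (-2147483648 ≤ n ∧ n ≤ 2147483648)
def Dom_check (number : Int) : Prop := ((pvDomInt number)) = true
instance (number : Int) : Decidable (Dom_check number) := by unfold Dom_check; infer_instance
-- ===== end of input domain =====

-- B drops the string conversion entirely: it extracts the decimal digits of abs(number)
-- arithmetically with divmod and rejects a zero digit or a repeated adjacent digit
-- in one pass (objective: alternative).

-- ===== PORT A =====
-- first loop of A: returns true iff some char of str(number) is '0' (A then returns False)
def checkZeroLoop : List Char → Bool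
  | [] => false
  | c :: rest => if c == '0' then true else checkZeroLoop rest

-- second loop of A: first/previous accumulator (previous starts as -1, modelled none, never compared while first)
def checkAdjLoop : List Char → Bool → Option Char → Bool
  | [], _, _ => true
  | c :: rest, first, previous =>
    if first then checkAdjLoop rest false (some c)
    else if some c == previous then false
    else checkAdjLoop rest false (some c)

-- body of A on the char list s = list(str(number))
def checkBody (s : List Char) : Bool :=
  if checkZeroLoop s then false
  else checkAdjLoop s true none

def check (number : Int) : Bool :=
  checkBody ((PySem.Int.toStr number).toList)

-- ===== PORT B =====
-- Source B's while-loop on n = abs(number): n stays nonnegative throughout, so it is carried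
-- as a Nat and Python's divmod(n, 10) is exactly (n / 10, n % 10) on Nat.
def checkAltLoop (n : Nat) (prev : Int) : Bool :=
  let d := n % 10
  if d == 0 || (d : Int) == prev then false
  else if n / 10 == 0 then true
  else checkAltLoop (n / 10) (d : Int)
termination_by n
decreasing_by
  simp only [beq_iff_eq, Bool.or_eq_true, not_or] at *
  exact Nat.div_lt_self (by omega) (by omega)

def check_alt (number : Int) : Bool := checkAltLoop number.natAbs (-1)

-- ===== PRECONDITION & SPEC =====
def Spec_check (number : Int) (out : Bool) : Prop := out = check_alt number
instance (number : Int) (out : Bool) : Decidable (Spec_check number out) := by unfold Spec_check; infer_instance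

-- ===== CLAIM (what is proved, stated in full; the proofs are below) =====
def Claim_equal_check : Prop := ∀ (number : Int), Dom_check number → Spec_check number (check number)

-- ===== LEMMAS AND PROOFS =====

-- LSB-first digit list of n (always nonempty; [0] for n = 0)
def Dlist (n : Nat) : List Nat :=
  (n % 10) :: (if h : n / 10 = 0 then [] else Dlist (n / 10))
termination_by n
decreasing_by exact Nat.div_lt_self (by omega) (by omega)

theorem Dlist_lt (n : Nat) : ∀ d ∈ Dlist n, d < 10 := by
  induction n using Dlist.induct with
  | _ n ih =>
    rw [Dlist]
    intro d hd
    rcases List.mem_cons.1 hd with h | h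
    · omega
    · split at h
      · simp at h
      · exact ih (by assumption) d h

theorem toDigitsCore_eq (f n : Nat) (acc : List Char) (h : n < f) :
    Nat.toDigitsCore 10 f n acc = ((Dlist n).map Nat.digitChar).reverse ++ acc := by
  induction f generalizing n acc with
  | zero => omega
  | succ f ih =>
    rw [Nat.toDigitsCore, Dlist]
    by_cases h0 : n / 10 = 0
    · simp [h0]
    · have hlt : n / 10 < f := by
        have := Nat.div_lt_self (n := n) (by omega) (by omega : 1 < 10)
        omega
      rw [if_neg h0, dif_neg h0, ih _ _ hlt]
      simp

theorem toDigits_eq (n : Nat) : Nat.toDigits 10 n = ((Dlist n).map Nat.digitChar).reverse := by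
  rw [Nat.toDigits, toDigitsCore_eq _ _ _ (Nat.lt_succ_self n), List.append_nil]

theorem digitChar_inj {d e : Nat} (hd : d < 10) (he : e < 10) :
    Nat.digitChar d = Nat.digitChar e ↔ d = e := by
  interval_cases d <;> interval_cases e <;> simp [Nat.digitChar]

theorem digitChar_eq_zero {d : Nat} (hd : d < 10) : (Nat.digitChar d = '0') ↔ d = 0 := by
  interval_cases d <;> simp [Nat.digitChar]

theorem digitChar_ne_dash {d : Nat} (hd : d < 10) : Nat.digitChar d ≠ '-' := by
  interval_cases d <;> simp [Nat.digitChar]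

-- A's zero loop is a containment test
theorem checkZeroLoop_eq_contains (s : List Char) : checkZeroLoop s = s.contains '0' := by
  induction s with
  | nil => rfl
  | cons c rest ih =>
    simp only [checkZeroLoop, List.contains_cons, ih]
    by_cases h : c = '0' <;> simp [h, BEq.comm]

-- A's adjacency loop, after the first element, checks the chain of ≠ seeded with the previous char
theorem checkAdjLoop_false (s : List Char) (p : Char) :
    checkAdjLoop s false (some p) = true ↔ List.IsChain (· ≠ ·) (p :: s) := by
  induction s generalizing p with
  | nil => simp [checkAdjLoop]
  | cons c rest ih =>
    rw [checkAdjLoop, if_neg (by simp), List.isChain_cons_cons]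
    by_cases h : c = p
    · subst h; simp
    · rw [if_neg (by simp [h]), ih c]
      exact ⟨fun hc => ⟨fun e => h e.symm, hc⟩, fun hc => hc.2⟩

theorem checkAdjLoop_true (s : List Char) :
    checkAdjLoop s true none = true ↔ List.IsChain (· ≠ ·) s := by
  cases s with
  | nil => simp [checkAdjLoop]
  | cons c rest => simp only [checkAdjLoop, if_pos, checkAdjLoop_false]

-- B's loop in terms of Dlist
theorem checkAltLoop_iff (n : Nat) : ∀ (prev : Int),
    checkAltLoop n prev = true ↔
      ((∀ d ∈ Dlist n, d ≠ 0) ∧ ((n % 10 : Nat) : Int) ≠ prev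
        ∧ List.IsChain (· ≠ ·) (Dlist n)) := by
  induction n using Nat.strong_induction_on with
  | _ n ih =>
    intro prev
    rw [checkAltLoop]
    by_cases hz : n % 10 = 0 ∨ ((n % 10 : Nat) : Int) = prev
    · rw [if_pos (by simpa using hz)]
      constructor
      · intro h; exact absurd h Bool.false_ne_true
      · rintro ⟨h1, h2, -⟩
        exfalso
        rcases hz with h | h
        · exact h1 (n % 10) (by rw [Dlist]; exact List.mem_cons_self) h
        · exact h2 h
    · push Not at hz
      rw [if_neg (by simp only [beq_iff_eq, Bool.or_eq_true, not_or]; exact ⟨hz.1, hz.2⟩)]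
      by_cases h0 : n / 10 = 0
      · rw [if_pos (by simpa using h0),
          show Dlist n = [n % 10] from by rw [Dlist]; simp [h0]]
        refine ⟨fun _ => ⟨?_, hz.2, List.isChain_singleton _⟩, fun _ => rfl⟩
        intro d hd
        rw [List.mem_singleton] at hd
        exact hd ▸ hz.1
      · have hlt : n / 10 < n := Nat.div_lt_self (by omega) (by omega)
        rw [if_neg (by simpa using h0), ih _ hlt]
        conv_rhs => rw [Dlist, dif_neg h0]
        obtain ⟨tl, ht⟩ : ∃ tl, Dlist (n / 10) = (n / 10 % 10) :: tl := by
          rw [Dlist]; exact ⟨_, rfl⟩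
        rw [ht]
        simp only [List.mem_cons, List.isChain_cons_cons, ne_eq, Int.natCast_inj]
        constructor
        · rintro ⟨h1, h2, h3⟩
          refine ⟨fun d hd => ?_, hz.2, fun e => h2 e.symm, h3⟩
          rcases hd with rfl | hd
          exacts [hz.1, h1 d hd]
        · rintro ⟨h1, -, h2, h3⟩
          exact ⟨fun d hd => h1 d (Or.inr hd), fun e => h2 e.symm, h3⟩

-- membership transfer: '0' occurs among the digit chars iff 0 is a digit
theorem contains_digits (l : List Nat) (h : ∀ d ∈ l, d < 10) :
    ((l.map Nat.digitChar).reverse.contains '0') = true ↔ 0 ∈ l := by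
  rw [List.contains_reverse]
  induction l with
  | nil => simp
  | cons d rest ih =>
    have hd := h d List.mem_cons_self
    rw [List.map_cons, List.contains_cons, Bool.or_eq_true, beq_iff_eq,
      ih (fun e he => h e (List.mem_cons_of_mem _ he)), List.mem_cons]
    have key : ('0' = Nat.digitChar d) ↔ 0 = d := by
      rw [eq_comm, digitChar_eq_zero hd, eq_comm]
    rw [key]

theorem chain_map_digitChar (l : List Nat) (h : ∀ d ∈ l, d < 10) :
    List.IsChain (· ≠ ·) (l.map Nat.digitChar) ↔ List.IsChain (· ≠ ·) l := by
  induction l with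
  | nil => simp
  | cons d rest ih =>
    cases rest with
    | nil => simp
    | cons e rest' =>
      have hd := h d List.mem_cons_self
      have he := h e (List.mem_cons_of_mem _ List.mem_cons_self)
      simp only [List.map_cons, List.isChain_cons_cons, ne_eq, digitChar_inj hd he]
      rw [← List.map_cons]
      exact and_congr Iff.rfl (ih (fun x hx => h x (List.mem_cons_of_mem _ hx)))

theorem chain_rev (l : List Nat) (h : ∀ d ∈ l, d < 10) :
    List.IsChain (· ≠ ·) ((l.map Nat.digitChar).reverse) ↔ List.IsChain (· ≠ ·) l := by
  rw [List.isChain_reverse, ← chain_map_digitChar l h]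
  constructor <;> exact fun hc => hc.imp (fun h' => by simp_all [ne_comm])

-- the '-' prefix never trips A's adjacency loop: it differs from every digit char
theorem chain_dash (l : List Nat) (h : ∀ d ∈ l, d < 10) :
    List.IsChain (· ≠ ·) ('-' :: (l.map Nat.digitChar).reverse) ↔
      List.IsChain (· ≠ ·) ((l.map Nat.digitChar).reverse) := by
  cases hc : (l.map Nat.digitChar).reverse with
  | nil => simp
  | cons c cs =>
    have hcm : c ∈ (l.map Nat.digitChar).reverse := by rw [hc]; exact List.mem_cons_self
    rw [List.mem_reverse, List.mem_map] at hcm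
    obtain ⟨d, hd, rfl⟩ := hcm
    rw [List.isChain_cons_cons]
    exact and_iff_right (fun e : '-' = Nat.digitChar d => digitChar_ne_dash (h d hd) e.symm)

-- common characterisation of A's result
theorem check_iff (number : Int) :
    check number = true ↔ ((∀ d ∈ Dlist number.natAbs, d ≠ 0)
        ∧ List.IsChain (· ≠ ·) (Dlist number.natAbs)) := by
  have hlt := Dlist_lt number.natAbs
  unfold check checkBody
  rw [PySem.Int.toList_toStr]
  unfold PySem.Int.toChars
  by_cases hneg : number < 0
  · rw [if_pos hneg, toDigits_eq]
    rw [checkZeroLoop_eq_contains]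
    rw [List.contains_cons, show (('0' : Char) == '-') = false from rfl, Bool.false_or]
    by_cases h0 : ((Dlist number.natAbs).map Nat.digitChar).reverse.contains '0' = true
    · rw [if_pos h0]
      rw [contains_digits _ hlt] at h0
      constructor
      · intro h; exact absurd h Bool.false_ne_true
      · rintro ⟨h1, -⟩; exact absurd (h1 0 h0) (by simp)
    · rw [if_neg h0, checkAdjLoop_true, chain_dash _ hlt, chain_rev _ hlt]
      rw [show (¬ _ = true) ↔ _ from not_iff_not.mpr (contains_digits _ hlt)] at h0
      exact ⟨fun hc => ⟨fun d hd e => h0 (e ▸ hd), hc⟩, fun hc => hc.2⟩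
  · rw [if_neg hneg]
    have hm : number.toNat = number.natAbs := by omega
    rw [hm, toDigits_eq, checkZeroLoop_eq_contains]
    by_cases h0 : ((Dlist number.natAbs).map Nat.digitChar).reverse.contains '0' = true
    · rw [if_pos h0]
      rw [contains_digits _ hlt] at h0
      constructor
      · intro h; exact absurd h Bool.false_ne_true
      · rintro ⟨h1, -⟩; exact absurd (h1 0 h0) (by simp)
    · rw [if_neg h0, checkAdjLoop_true, chain_rev _ hlt]
      rw [show (¬ _ = true) ↔ _ from not_iff_not.mpr (contains_digits _ hlt)] at h0
      exact ⟨fun hc => ⟨fun d hd e => h0 (e ▸ hd), hc⟩, fun hc => hc.2⟩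

-- ===== VERDICT (by name: the statement is the Claim_ definition above) =====
theorem check_spec : Claim_equal_check := by
  intro number _
  unfold Spec_check check_alt
  have hA := check_iff number
  have hB := checkAltLoop_iff number.natAbs (-1)
  have hni : ((number.natAbs % 10 : Nat) : Int) ≠ (-1 : Int) := by omega
  cases hc : check number <;> cases hc' : checkAltLoop number.natAbs (-1) <;> simp_all
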